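-- pv_equiv track=rewrite | github.com/Shriya613/NLP-201 | Assignment-3/part2.py | get_tagged_sentences
-- ===== SOURCE A (Python) =====
-- def get_tagged_sentences(text):
--     sentences = []
--     blocks = text.split("======================================")
--     for block in blocks:
--         sents = block.split("\n\n")
--         for sent in sents:
--             sent = sent.replace("\n", "").replace("[", "").replace("]", "")
--             if sent != "":
--                 sentences.append(sent)
--     return sentences
-- ===== SOURCE B (Python) =====
-- def get_tagged_sentences(text):
--     BIG = "======================================"
--     sentences = []
--     cur = []
--     i = 0
--     n = len(text)
--     while i < n:
--         if text.startswith(BIG, i):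
--             if cur:
--                 sentences.append("".join(cur))
--                 cur = []
--             i += len(BIG)
--         elif text.startswith("\n\n", i):
--             if cur:
--                 sentences.append("".join(cur))
--                 cur = []
--             i += 2
--         else:
--             c = text[i]
--             if c != "\n" and c != "[" and c != "]":
--                 cur.append(c)
--             i += 1
--     if cur:
--         sentences.append("".join(cur))
--     return sentences
-- ===== Notes on version B (the rewrite author's own statement) =====
-- stated objective: alternative
-- what changed: A's two nested split passes (on the 38-equals bar, then on blank lines) followed by three replace passes per sentence are replaced by a single left-to-right scan that matches both delimiters in place, drops the newline and bracket characters as it goes, and flushes the current sentence at each delimiter.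
import Mathlib
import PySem

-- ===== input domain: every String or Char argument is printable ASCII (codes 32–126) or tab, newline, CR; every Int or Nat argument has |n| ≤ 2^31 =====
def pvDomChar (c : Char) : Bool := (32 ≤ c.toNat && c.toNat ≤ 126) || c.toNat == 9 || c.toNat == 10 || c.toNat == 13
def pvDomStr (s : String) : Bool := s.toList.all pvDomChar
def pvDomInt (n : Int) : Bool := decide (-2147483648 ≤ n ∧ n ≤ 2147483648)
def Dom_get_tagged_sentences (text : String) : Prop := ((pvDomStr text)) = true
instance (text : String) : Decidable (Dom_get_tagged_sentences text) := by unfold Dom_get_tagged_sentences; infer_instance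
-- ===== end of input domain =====

-- B replaces A's two nested split passes plus three per-sentence replace passes by a single
-- left-to-right scan that matches both delimiters in place (objective: alternative).

-- the two delimiter constants shared by both ports
def pvBIG : List Char := "======================================".toList
def pvNL : List Char := "\n\n".toList

-- ===== PORT A =====
-- sent.replace("\n", "").replace("[", "").replace("]", "")
def pvClean (s : List Char) : List Char :=
  PySem.Chars.replace (PySem.Chars.replace (PySem.Chars.replace s ['\n'] []) ['['] []) [']'] []

def get_tagged_sentences (text : String) : List String :=
  (PySem.Chars.splitOn text.toList pvBIG).foldl (fun sentences block =>
    (PySem.Chars.splitOn block pvNL).foldl (fun sentences sent =>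
      let s := pvClean sent
      if s ≠ [] then sentences ++ [String.ofList s] else sentences) sentences) []

-- ===== PORT B =====
-- Source B: 'if cur: sentences.append("".join(cur)); cur = []'
def pvFlush (cur : List Char) (acc : List String) : List String :=
  if cur ≠ [] then acc ++ [String.ofList cur] else acc

-- Source B's while-loop; the remaining suffix of the text plays the role of the index i
def pvGoB : List Char → List Char → List String → List String
  | [], cur, acc => pvFlush cur acc
  | c :: t, cur, acc =>
    if pvBIG.isPrefixOf (c :: t) then pvGoB ((c :: t).drop 38) [] (pvFlush cur acc)
    else if pvNL.isPrefixOf (c :: t) then pvGoB ((c :: t).drop 2) [] (pvFlush cur acc)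
    else pvGoB t (if c ≠ '\n' ∧ c ≠ '[' ∧ c ≠ ']' then cur ++ [c] else cur) acc
  termination_by l _ _ => l.length
  decreasing_by all_goals (simp [List.length_drop]; try omega)

def get_tagged_sentences_alt (text : String) : List String := pvGoB text.toList [] []

-- ===== PRECONDITION & SPEC =====
def Spec_get_tagged_sentences (text : String) (out : List String) : Prop := out = get_tagged_sentences_alt text
instance (text : String) (out : List String) : Decidable (Spec_get_tagged_sentences text out) := by unfold Spec_get_tagged_sentences; infer_instance

-- ===== CLAIM (what is proved, stated in full; the proofs are below) =====
def Claim_equal_get_tagged_sentences : Prop := ∀ (text : String), Dom_get_tagged_sentences text → Spec_get_tagged_sentences text (get_tagged_sentences text)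

-- ===== LEMMAS AND PROOFS =====

def pvKeep (c : Char) : Bool := !(c == '\n' || c == '[' || c == ']')
def pvSplit (sep : List Char) : List Char → List (List Char)
  | [] => [[]]
  | c :: t =>
    if sep.isPrefixOf (c :: t) && !sep.isEmpty then [] :: pvSplit sep ((c :: t).drop sep.length)
    else (pvSplit sep t).modifyHead (c :: ·)
  termination_by l => l.length
  decreasing_by all_goals (simp [List.length_drop]; try (rename_i h; cases sep <;> simp_all))
def pvSpec : List Char → List (List Char)
  | [] => [[]]
  | c :: t =>
    if pvBIG.isPrefixOf (c :: t) then [] :: pvSpec ((c :: t).drop 38)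
    else if pvNL.isPrefixOf (c :: t) then [] :: pvSpec ((c :: t).drop 2)
    else (pvSpec t).modifyHead (c :: ·)
  termination_by l => l.length
  decreasing_by all_goals (simp [List.length_drop]; try omega)

theorem pvSpec_shape (l : List Char) : ∃ p ps, pvSpec l = p :: ps := by
  fun_induction pvSpec l with
  | case1 => exact ⟨[], [], rfl⟩
  | case2 c t h ih => exact ⟨[], _, rfl⟩
  | case3 c t h h2 ih => exact ⟨[], _, rfl⟩
  | case4 c t h h2 ih =>
    obtain ⟨p, ps, hp⟩ := ih
    exact ⟨c :: p, ps, by simp [hp]⟩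

theorem pvSplit_shape (sep l : List Char) : ∃ p ps, pvSplit sep l = p :: ps ∧ p <+: l := by
  fun_induction pvSplit sep l with
  | case1 => exact ⟨[], [], rfl, List.nil_prefix⟩
  | case2 c t h ih => exact ⟨[], _, rfl, List.nil_prefix⟩
  | case3 c t h ih =>
    obtain ⟨p, ps, hp, hpre⟩ := ih
    exact ⟨c :: p, ps, by simp [hp], by simpa using hpre⟩

theorem pvReplaceGo (c : Char) : ∀ (fuel : ℕ) (l acc : List Char), l.length ≤ fuel →
    PySem.Chars.replace.go [c] [] fuel l acc = acc.reverse ++ l.filter (fun x => !(x == c)) := by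
  intro fuel
  induction fuel with
  | zero =>
    intro l acc h
    have : l = [] := List.length_eq_zero_iff.mp (Nat.le_zero.mp h)
    subst this; simp [PySem.Chars.replace.go]
  | succ n ih =>
    intro l acc h
    cases l with
    | nil => simp [PySem.Chars.replace.go]
    | cons d t =>
      rw [PySem.Chars.replace.go]
      simp only [List.isPrefixOf_cons₂, List.isPrefixOf, Bool.and_true]
      by_cases hc : c = d
      · subst hc
        rw [if_pos (by simp)]
        rw [ih _ _ (by simpa using h)]
        simp
      · rw [if_neg (by simp; exact hc)]
        rw [ih _ _ (by simpa using h)]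
        simp [Ne.symm hc]

theorem pvReplace_single (c : Char) (s : List Char) :
    PySem.Chars.replace s [c] [] = s.filter (fun x => !(x == c)) := by
  rw [PySem.Chars.replace]
  rw [if_neg (by simp)]
  simpa using pvReplaceGo c s.length s [] le_rfl


theorem pvClean_eq_filter (s : List Char) : pvClean s = s.filter pvKeep := by
  unfold pvClean
  rw [pvReplace_single, pvReplace_single, pvReplace_single, List.filter_filter, List.filter_filter]
  refine List.filter_congr ?_
  intro x _
  simp only [pvKeep]
  cases h1 : x == '\n' <;> cases h2 : x == '[' <;> cases h3 : x == ']' <;> simp [h1, h2, h3]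

theorem pvSplitGo (sep : List Char) (hsep : sep ≠ []) : ∀ (fuel : ℕ) (l cur : List Char) (acc : List (List Char)),
    l.length < fuel →
    PySem.Chars.splitOn.go sep fuel l cur acc
      = acc.reverse ++ ((pvSplit sep l).modifyHead (cur.reverse ++ ·)) := by
  intro fuel
  induction fuel with
  | zero => intro l cur acc h; omega
  | succ n ih =>
    intro l cur acc h
    cases l with
    | nil => rw [PySem.Chars.splitOn.go.eq_def]; simp [pvSplit]
    | cons d t =>
      rw [PySem.Chars.splitOn.go.eq_def]
      simp only []
      by_cases hp : sep.isPrefixOf (d :: t)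
      · rw [if_pos hp]
        have hlen : 1 ≤ sep.length := by cases sep <;> simp_all
        rw [ih _ _ _ (by simp only [List.length_drop, List.length_cons] at h ⊢; omega)]
        rw [pvSplit]
        rw [if_pos (by simp [hp, hsep])]
        obtain ⟨p, ps, hps, -⟩ := pvSplit_shape sep ((d :: t).drop sep.length)
        simp [hps]
      · rw [if_neg hp]
        rw [ih _ _ _ (by simp at h ⊢; omega)]
        rw [pvSplit, if_neg (by simp [hp])]
        obtain ⟨p, ps, hps, -⟩ := pvSplit_shape sep t
        simp [hps]

theorem pvSplitOn_eq (sep l : List Char) (h : sep ≠ []) :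
    PySem.Chars.splitOn l sep = pvSplit sep l := by
  rw [PySem.Chars.splitOn, pvSplitGo sep h _ _ _ _ (by omega)]
  obtain ⟨p, ps, hps, -⟩ := pvSplit_shape sep l
  simp [hps]

def pvOut (pieces : List (List Char)) : List String :=
  pieces.filterMap (fun p => if p.filter pvKeep ≠ [] then some (String.ofList (p.filter pvKeep)) else none)

theorem pvOut_append (xs ys : List (List Char)) : pvOut (xs ++ ys) = pvOut xs ++ pvOut ys := by
  simp [pvOut]

theorem pvFoldl_inner (pieces : List (List Char)) (acc : List String) :
    pieces.foldl (fun sentences sent =>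
      let s := pvClean sent
      if s ≠ [] then sentences ++ [String.ofList s] else sentences) acc
    = acc ++ pvOut pieces := by
  induction pieces generalizing acc with
  | nil => simp [pvOut]
  | cons p ps ih =>
    rw [List.foldl_cons, ih]
    simp only [pvClean_eq_filter, pvOut, List.filterMap_cons]
    split_ifs with h <;> simp

theorem pvFoldl_outer (blocks : List (List Char)) (acc : List String) :
    blocks.foldl (fun sentences block =>
      (PySem.Chars.splitOn block pvNL).foldl (fun sentences sent =>
        let s := pvClean sent
        if s ≠ [] then sentences ++ [String.ofList s] else sentences) sentences) acc
    = acc ++ pvOut (blocks.flatMap (fun b => pvSplit pvNL b)) := by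
  induction blocks generalizing acc with
  | nil => simp [pvOut]
  | cons b bs ih =>
    simp only [List.foldl_cons, List.flatMap_cons, pvOut_append]
    rw [pvSplitOn_eq _ _ (by decide), pvFoldl_inner, ih]
    simp

theorem pvBIG_cons : pvBIG = '=' :: pvBIG.tail := by decide
theorem pvNL_cons : pvNL = '\n' :: ['\n'] := by decide

theorem pvBIG_not_prefix {c : Char} (h : c ≠ '=') (x : List Char) :
    pvBIG.isPrefixOf (c :: x) = false := by
  rw [pvBIG_cons, List.isPrefixOf_cons₂]
  simp [Ne.symm h]

theorem pvMain_aux : ∀ (n : ℕ) (l : List Char), l.length ≤ n →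
    (pvSplit pvBIG l).flatMap (fun b => pvSplit pvNL b) = pvSpec l := by
  intro n
  induction n with
  | zero =>
    intro l h
    have hl : l = [] := List.length_eq_zero_iff.mp (Nat.le_zero.mp h)
    subst hl; simp [pvSplit, pvSpec]
  | succ n ih =>
    intro l h
    cases l with
    | nil => simp [pvSplit, pvSpec]
    | cons c t =>
      by_cases hb : pvBIG.isPrefixOf (c :: t)
      · rw [pvSplit, if_pos (by simp [hb]; decide), pvSpec, if_pos hb]
        have hlen : (38 : ℕ) ≤ (c :: t).length := by
          have := (List.isPrefixOf_iff_prefix.mp hb).length_le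
          simpa [pvBIG] using this
        rw [List.flatMap_cons, ih _ (by simp [pvBIG] at h hlen ⊢; omega)]
        simp [pvSplit, pvBIG]
      · by_cases hn : pvNL.isPrefixOf (c :: t)
        · obtain ⟨r, hr⟩ := List.isPrefixOf_iff_prefix.mp hn
          rw [pvNL_cons] at hr
          simp only [List.cons_append, List.nil_append] at hr
          injection hr with hc1 hr2
          subst hc1
          subst hr2
          rw [pvSplit, if_neg (by simp [pvBIG_not_prefix (show ('\n':Char) ≠ '=' by decide) _])]
          rw [pvSplit, if_neg (by simp [pvBIG_not_prefix (show ('\n':Char) ≠ '=' by decide) _])]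
          obtain ⟨b0, bs, hbs, -⟩ := pvSplit_shape pvBIG r
          rw [hbs]
          simp only [List.modifyHead_cons, List.flatMap_cons]
          rw [pvSplit, if_pos (by rw [pvNL_cons, List.isPrefixOf_cons₂]; simp [List.isPrefixOf_cons₂, List.isPrefixOf])]
          rw [pvSpec, if_neg (by simp [pvBIG_not_prefix (show ('\n':Char) ≠ '=' by decide) _]), if_pos hn]
          have ihx := ih r (by simp at h; omega)
          rw [hbs, List.flatMap_cons] at ihx
          rw [show pvNL.length = 2 by decide]
          simp only [List.drop_succ_cons, List.drop_zero]
          simp [ihx]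
        · rw [pvSplit, if_neg (by simp [hb]), pvSpec, if_neg hb, if_neg hn]
          obtain ⟨b0, bs, hbs, hpre⟩ := pvSplit_shape pvBIG t
          rw [hbs, List.modifyHead_cons, List.flatMap_cons]
          have hnp : pvNL.isPrefixOf (c :: b0) = false := by
            by_contra hcb
            rw [Bool.not_eq_false] at hcb
            obtain ⟨r2, hr2⟩ := List.isPrefixOf_iff_prefix.mp hcb
            rw [pvNL_cons] at hr2
            simp only [List.cons_append, List.nil_append] at hr2
            injection hr2 with hc1 hr3
            subst hc1
            obtain ⟨r3, hr4⟩ := hpre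
            apply hn
            rw [← hr4, ← hr3]
            rw [pvNL_cons, List.isPrefixOf_cons₂]
            simp [List.isPrefixOf_cons₂, List.isPrefixOf]
          rw [pvSplit, if_neg (by simp [hnp])]
          obtain ⟨q, qs, hq, -⟩ := pvSplit_shape pvNL b0
          have ihx := ih t (by simp at h; omega)
          rw [hbs, List.flatMap_cons] at ihx
          rw [hq, ← ihx]
          obtain ⟨q2, qs2, hq2, -⟩ := pvSplit_shape pvNL b0
          simp [hq]

theorem pvMain (l : List Char) :
    (pvSplit pvBIG l).flatMap (fun b => pvSplit pvNL b) = pvSpec l :=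
  pvMain_aux l.length l le_rfl



theorem pvKeep_iff (c : Char) : pvKeep c = true ↔ (c ≠ '\n' ∧ c ≠ '[' ∧ c ≠ ']') := by
  simp [pvKeep, and_assoc]

theorem pvOut_cons (cur : List Char) (rest : List (List Char)) (hcur : cur.filter pvKeep = cur) :
    pvOut (cur :: rest) = (if cur ≠ [] then [String.ofList cur] else []) ++ pvOut rest := by
  rw [pvOut, List.filterMap_cons, hcur]
  split_ifs with h1 <;> simp [pvOut]

theorem pvFlush_eq (cur : List Char) (acc : List String) :
    pvFlush cur acc = acc ++ (if cur ≠ [] then [String.ofList cur] else []) := by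
  rw [pvFlush]; split_ifs <;> simp

theorem pvGoB_eq : ∀ (n : ℕ) (l : List Char), l.length ≤ n → ∀ (cur : List Char) (acc : List String),
    cur.filter pvKeep = cur →
    pvGoB l cur acc = acc ++ pvOut ((pvSpec l).modifyHead (cur ++ ·)) := by
  intro n
  induction n with
  | zero =>
    intro l h cur acc hcur
    have hl : l = [] := List.length_eq_zero_iff.mp (Nat.le_zero.mp h)
    subst hl
    rw [pvGoB, show pvSpec [] = [[]] from by rw [pvSpec]]
    simp only [List.modifyHead_cons, List.append_nil]
    rw [pvOut_cons _ _ hcur, pvFlush_eq]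
    simp [pvOut]
  | succ n ih =>
    intro l h cur acc hcur
    cases l with
    | nil =>
      rw [pvGoB, show pvSpec [] = [[]] from by rw [pvSpec]]
      simp only [List.modifyHead_cons, List.append_nil]
      rw [pvOut_cons _ _ hcur, pvFlush_eq]
      simp [pvOut]
    | cons c t =>
      by_cases hb : pvBIG.isPrefixOf (c :: t)
      · rw [pvGoB, if_pos hb]
        have hlen : (38 : ℕ) ≤ (c :: t).length := by
          have := (List.isPrefixOf_iff_prefix.mp hb).length_le
          simpa [pvBIG] using this
        rw [ih _ (by simp at h ⊢; omega) [] _ (by simp)]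
        rw [pvSpec, if_pos hb]
        obtain ⟨p, ps, hp⟩ := pvSpec_shape ((c :: t).drop 38)
        rw [hp, pvFlush_eq]
        simp only [List.modifyHead_cons, List.nil_append, List.append_nil]
        rw [pvOut_cons _ _ hcur]
        simp
      · by_cases hn : pvNL.isPrefixOf (c :: t)
        · rw [pvGoB, if_neg hb, if_pos hn]
          rw [ih _ (by simp at h ⊢; omega) [] _ (by simp)]
          rw [pvSpec, if_neg hb, if_pos hn]
          obtain ⟨p, ps, hp⟩ := pvSpec_shape ((c :: t).drop 2)
          rw [hp, pvFlush_eq]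
          simp only [List.modifyHead_cons, List.nil_append, List.append_nil]
          rw [pvOut_cons _ _ hcur]
          simp
        · rw [pvGoB, if_neg hb, if_neg hn]
          have hcur' : (if c ≠ '\n' ∧ c ≠ '[' ∧ c ≠ ']' then cur ++ [c] else cur).filter pvKeep
              = (if c ≠ '\n' ∧ c ≠ '[' ∧ c ≠ ']' then cur ++ [c] else cur) := by
            split_ifs with hk
            · rw [List.filter_append, hcur]
              simp [List.filter, (pvKeep_iff c).mpr hk]
            · exact hcur
          rw [ih _ (by simp at h ⊢; omega) _ acc hcur']
          rw [pvSpec, if_neg hb, if_neg hn]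
          obtain ⟨p, ps, hp⟩ := pvSpec_shape t
          rw [hp]
          simp only [List.modifyHead_cons]
          have hhead : (((if c ≠ '\n' ∧ c ≠ '[' ∧ c ≠ ']' then cur ++ [c] else cur) ++ p).filter pvKeep)
              = ((cur ++ c :: p).filter pvKeep) := by
            by_cases hk : c ≠ '\n' ∧ c ≠ '[' ∧ c ≠ ']'
            · have hkc : pvKeep c = true := (pvKeep_iff c).mpr hk
              rw [if_pos hk]
              simp [List.filter_append, hcur, hkc]
            · have hkc : pvKeep c = false := by
                cases hkc2 : pvKeep c
                · rfl
                · exact absurd ((pvKeep_iff c).mp hkc2) hk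
              rw [if_neg hk]
              simp [List.filter_append, hcur, hkc]
          rw [pvOut, pvOut, List.filterMap_cons, List.filterMap_cons, hhead]

-- ===== VERDICT (by name: the statement is the Claim_ definition above) =====
theorem get_tagged_sentences_spec : Claim_equal_get_tagged_sentences := by
  intro text _
  unfold Spec_get_tagged_sentences get_tagged_sentences get_tagged_sentences_alt
  rw [pvSplitOn_eq _ text.toList (by decide), pvFoldl_outer, pvMain]
  rw [pvGoB_eq text.toList.length text.toList le_rfl [] [] (by simp)]
  obtain ⟨p, ps, hp⟩ := pvSpec_shape text.toList
  simp [hp]
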